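-- pv_equiv track=rewrite | github.com/vissesse/dev-loja | app_loja/normalizar.py | formatar_data
-- ===== SOURCE A (Python) =====
-- def formatar_data(data):
--     new_data = ''
--     i = 0
--     for n in data:
--         if i == 4 or i == 6:
--             new_data += '-'
--         new_data += n
--         i += 1
--     return new_data
-- ===== SOURCE B (Python) =====
-- def formatar_data(data):
--     out = data[:4]
--     if len(data) > 4:
--         out += '-' + data[4:6]
--     if len(data) > 6:
--         out += '-' + data[6:]
--     return out
-- ===== Notes on version B (the rewrite author's own statement) =====
-- stated objective: faster
-- what changed: Replaces the indexed character-by-character accumulation loop with three fixed slices (data[:4], data[4:6], data[6:]) joined by hyphens, each guarded by a length check.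
import Mathlib
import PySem

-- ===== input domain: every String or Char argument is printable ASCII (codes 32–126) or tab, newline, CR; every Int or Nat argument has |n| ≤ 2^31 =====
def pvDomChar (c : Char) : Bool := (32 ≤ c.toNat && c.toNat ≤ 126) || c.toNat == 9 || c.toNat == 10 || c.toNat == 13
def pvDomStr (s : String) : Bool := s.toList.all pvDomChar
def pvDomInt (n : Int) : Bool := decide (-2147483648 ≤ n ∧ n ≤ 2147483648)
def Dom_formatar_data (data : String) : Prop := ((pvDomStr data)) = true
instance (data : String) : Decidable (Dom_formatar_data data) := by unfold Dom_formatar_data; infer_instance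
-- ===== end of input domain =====

-- B replaces A's indexed per-character loop by three fixed slices joined with guarded hyphens (measurably faster by constant factor).


-- ===== PORT A =====
-- literal port of A: accumulate characters, inserting '-' before positions 4 and 6
def formatar_data (data : String) : String :=
  (data.toList.foldl
    (fun (st : String × Nat) n =>
      let new_data := if st.2 = 4 ∨ st.2 = 6 then st.1.push '-' else st.1
      (new_data.push n, st.2 + 1))
    ("", 0)).1

-- ===== PORT B =====
-- literal port of B: data[:4], then guarded '-' + data[4:6], then guarded '-' + data[6:]
def formatar_data_alt (data : String) : String :=
  let out := PySem.Str.slice data none (some 4)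
  let out := if 4 < PySem.Str.len data then out ++ "-" ++ PySem.Str.slice data (some 4) (some 6) else out
  if 6 < PySem.Str.len data then out ++ "-" ++ PySem.Str.slice data (some 6) none else out

-- ===== PRECONDITION & SPEC =====
def Spec_formatar_data (data : String) (out : String) : Prop := out = formatar_data_alt data
instance (data : String) (out : String) : Decidable (Spec_formatar_data data out) := by unfold Spec_formatar_data; infer_instance

-- ===== CLAIM (what is proved, stated in full; the proofs are below) =====
def Claim_equal_formatar_data : Prop := ∀ (data : String), Dom_formatar_data data → Spec_formatar_data data (formatar_data data)

-- ===== LEMMAS AND PROOFS =====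

-- once the index is ≥ 7, A's loop just appends the rest of the characters
lemma foldA_high (l : List Char) (s : String) (i : Nat) (hi : 7 ≤ i) :
    ((l.foldl
      (fun (st : String × Nat) n =>
        let new_data := if st.2 = 4 ∨ st.2 = 6 then st.1.push '-' else st.1
        (new_data.push n, st.2 + 1))
      (s, i)).1).toList = s.toList ++ l := by
  induction l generalizing s i with
  | nil => simp
  | cons c cs ih =>
    have h4 : ¬ (i = 4 ∨ i = 6) := by omega
    simp only [List.foldl_cons, h4, if_false]
    rw [ih (s.push c) (i+1) (by omega)]
    simp

lemma toList_eq (s t : String) (h : s.toList = t.toList) : s = t := by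
  have := congrArg String.ofList h
  simpa using this

theorem formatar_data_spec : Claim_equal_formatar_data := by
  intro data _
  unfold Spec_formatar_data formatar_data formatar_data_alt
  apply toList_eq
  simp only [PySem.Str.len, apply_ite (String.toList),
    String.toList_append, PySem.Str.toList_slice]
  generalize data.toList = l
  rcases l with _ | ⟨a, _ | ⟨b, _ | ⟨c, _ | ⟨d, _ | ⟨e, _ | ⟨f, _ | ⟨g, rest⟩⟩⟩⟩⟩⟩⟩ <;>
    simp [PySem.Chars.slice, PySem.List.slice, PySem.List.clampIdx,
      List.foldl, foldA_high, String.toList_push] <;>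
    (rw [if_pos (by omega), if_pos (by omega)]; rfl)

-- ===== VERDICT (by name: the statement is the Claim_ definition above) =====
-- (proved above)
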